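-- pv_equiv track=rewrite | github.com/elaineiou/leetcodePy | advanced_py/Smallest_element_larger_than.py | smallestElementLargerThanTarget
-- ===== SOURCE A (Python) =====
-- def smallestElementLargerThanTarget(array, target):
--   """
--   input: int[] array, int target
--   return: int
--   """
--   left = 0
--   right = len(array) - 1
--   while (left < right - 1):
--     mid = left + (right - left)//2
--     if (array[mid]<=target):
--       left = mid + 1
--     else:
--       right = mid
--   if array[left] > target:
--     return left
--   if array[right] > target:
--     return right
--   return left
-- ===== SOURCE B (Python) =====
-- def smallestElementLargerThanTarget(array, target):
--   lo = 0
--   seg = list(array)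
--   while len(seg) > 2:
--     k = (len(seg) - 1) // 2
--     if seg[k] <= target:
--       lo += k + 1
--       seg = seg[k+1:]
--     else:
--       seg = seg[:k+1]
--   if seg[0] > target:
--     return lo
--   if seg[-1] > target:
--     return lo + len(seg) - 1
--   return lo
-- ===== Notes on version B (the rewrite author's own statement) =====
-- stated objective: alternative
-- what changed: Replaces A's index-pair (left,right) binary-search loop over the fixed array with a loop that carries an offset and the current list SEGMENT itself, halving the segment with slicing (seg[k+1:] / seg[:k+1]) until at most two elements remain.
import Mathlib
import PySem

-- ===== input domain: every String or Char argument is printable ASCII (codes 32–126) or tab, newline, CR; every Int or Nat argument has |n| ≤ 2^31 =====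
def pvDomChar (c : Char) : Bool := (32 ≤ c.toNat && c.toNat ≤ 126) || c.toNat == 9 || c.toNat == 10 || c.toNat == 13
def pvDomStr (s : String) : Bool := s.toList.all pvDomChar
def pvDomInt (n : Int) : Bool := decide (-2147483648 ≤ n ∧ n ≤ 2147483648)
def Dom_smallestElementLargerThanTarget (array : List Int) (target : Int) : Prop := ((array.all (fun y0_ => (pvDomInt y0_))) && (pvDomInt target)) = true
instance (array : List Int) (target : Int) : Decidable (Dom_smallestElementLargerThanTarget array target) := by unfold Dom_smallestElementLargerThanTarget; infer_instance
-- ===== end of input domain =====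

-- B replaces A's index-pair binary-search loop with a slice-carrying loop that halves a
-- list segment (offset + seg[k+1:] / seg[:k+1]) until ≤ 2 elements remain; objective: alternative.


-- ===== PORT A =====
-- midpoint step bound, used by port A's termination proof
theorem pvMidBounds (d : Int) (_h : 2 ≤ d) :
    1 ≤ PySem.Int.floordiv d 2 ∧ PySem.Int.floordiv d 2 ≤ d - 1 := by
  rw [PySem.Int.floordiv_eq_ediv_of_pos (by omega)]
  omega

-- array[i]; Python raises IndexError out of range (only reachable on [], excluded by Pre_)
def pvGet (array : List Int) (i : Int) : Int := (PySem.List.pyGet? array i).getD 0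

-- the while-loop: state (left, right), returns the final state
def pvLoopA (array : List Int) (target : Int) (left right : Int) : Int × Int :=
  if _h : left < right - 1 then
    let mid := left + PySem.Int.floordiv (right - left) 2
    if pvGet array mid ≤ target then
      pvLoopA array target (mid + 1) right
    else
      pvLoopA array target left mid
  else
    (left, right)
termination_by (right - left).toNat
decreasing_by
  · have := pvMidBounds (right - left) (by omega); omega
  · have := pvMidBounds (right - left) (by omega); omega

def smallestElementLargerThanTarget (array : List Int) (target : Int) : Int :=
  let lr := pvLoopA array target 0 (array.length - 1)
  if pvGet array lr.1 > target then lr.1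
  else if pvGet array lr.2 > target then lr.2
  else lr.1

-- ===== PORT B =====
-- the while-loop: state (lo, seg); seg is the remaining slice of the array, lo its offset
def pvSegB (tgt : Int) (lo : Int) (seg : List Int) : Int :=
  if h2 : 2 < seg.length then
    if seg.getD ((seg.length - 1) / 2) 0 ≤ tgt then
      pvSegB tgt (lo + ((seg.length - 1) / 2 : Nat) + 1) (seg.drop ((seg.length - 1) / 2 + 1))
    else
      pvSegB tgt lo (seg.take ((seg.length - 1) / 2 + 1))
  else
    if seg.getD 0 0 > tgt then lo
    else if seg.getLastD 0 > tgt then lo + seg.length - 1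
    else lo
termination_by seg.length
decreasing_by
  · simp; omega
  · simp; omega

def smallestElementLargerThanTarget_alt (array : List Int) (target : Int) : Int :=
  pvSegB target 0 array

-- ===== PRECONDITION & SPEC =====
-- Pre_ excludes only the empty list, on which Python A raises IndexError (array[0] after the loop).
def Pre_smallestElementLargerThanTarget (array : List Int) (target : Int) : Prop := array ≠ []
instance (array : List Int) (target : Int) : Decidable (Pre_smallestElementLargerThanTarget array target) := by unfold Pre_smallestElementLargerThanTarget; infer_instance
def pvWitness_smallestElementLargerThanTarget : List Int × Int := ([1, 3, 5, 7], 4)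

def Spec_smallestElementLargerThanTarget (array : List Int) (target : Int) (out : Int) : Prop := out = smallestElementLargerThanTarget_alt array target
instance (array : List Int) (target : Int) (out : Int) : Decidable (Spec_smallestElementLargerThanTarget array target out) := by unfold Spec_smallestElementLargerThanTarget; infer_instance

-- ===== CLAIM (what is proved, stated in full; the proofs are below) =====
def Claim_equal_smallestElementLargerThanTarget : Prop := ∀ (array : List Int) (target : Int), Dom_smallestElementLargerThanTarget array target → Pre_smallestElementLargerThanTarget array target → Spec_smallestElementLargerThanTarget array target (smallestElementLargerThanTarget array target)

-- ===== LEMMAS AND PROOFS =====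

theorem pvGetD_drop (seg : List Int) (m j : Nat) :
    (seg.drop m).getD j 0 = seg.getD (m + j) 0 := by
  simp [List.getD, List.getElem?_drop]

theorem pvGetD_take (seg : List Int) (m j : Nat) (hjm : j < m) :
    (seg.take m).getD j 0 = seg.getD j 0 := by
  simp [List.getD, hjm]

theorem pvGetLastD (seg : List Int) (h : seg ≠ []) :
    seg.getLastD 0 = seg.getD (seg.length - 1) 0 := by
  rw [List.getLastD_eq_getLast?, List.getLast?_eq_getElem?]
  simp [List.getD]

-- A's loop on interval [l, l+|seg|-1] followed by its final check equals B's loop on (l, seg),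
-- whenever seg is nonempty and mirrors the array at offset l.
theorem pvLoopA_eq_segB (array : List Int) (target : Int) :
    ∀ n (l : Int) (seg : List Int), seg.length ≤ n → seg ≠ [] → 0 ≤ l →
      (∀ j : Nat, j < seg.length → pvGet array (l + j) = seg.getD j 0) →
      (let lr := pvLoopA array target l (l + seg.length - 1)
       if pvGet array lr.1 > target then lr.1
       else if pvGet array lr.2 > target then lr.2
       else lr.1) = pvSegB target l seg := by
  intro n
  induction n with
  | zero =>
      intro l seg hn hne _ _
      cases seg with
      | nil => exact absurd rfl hne
      | cons a t => simp at hn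
  | succ n ih =>
      intro l seg hn hne hl hidx
      have hpos : 0 < seg.length := List.length_pos_of_ne_nil hne
      rw [pvSegB]
      by_cases h2 : 2 < seg.length
      · have hk1 : 1 ≤ (seg.length - 1) / 2 := by omega
        have hk2 : (seg.length - 1) / 2 + 1 ≤ seg.length - 1 := by omega
        have hfd : PySem.Int.floordiv ((seg.length : Int) - 1) 2
            = (((seg.length - 1) / 2 : Nat) : Int) := by
          rw [PySem.Int.floordiv_eq_ediv_of_pos (by norm_num)]
          omega
        rw [pvLoopA, dif_pos (by omega)]
        simp only [show (l + (seg.length : Int) - 1) - l = (seg.length : Int) - 1 from by ring, hfd]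
        have hmid := hidx ((seg.length - 1) / 2) (by omega)
        rw [hmid, dif_pos h2]
        by_cases hc : seg.getD ((seg.length - 1) / 2) 0 ≤ target
        · simp only [if_pos hc]
          have hlen' : (seg.drop ((seg.length - 1) / 2 + 1)).length
              = seg.length - ((seg.length - 1) / 2 + 1) := by simp
          have hr : l + (seg.length : Int) - 1
              = (l + (((seg.length - 1) / 2 : Nat) : Int) + 1)
                + ((seg.drop ((seg.length - 1) / 2 + 1)).length : Int) - 1 := by
            rw [hlen']; omega
          rw [hr]
          exact ih (l + (((seg.length - 1) / 2 : Nat) : Int) + 1) _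
            (by rw [hlen']; omega)
            (by intro he; rw [← List.length_eq_zero_iff] at he; omega)
            (by omega)
            (by
              intro j hj
              rw [hlen'] at hj
              have hidx' := hidx ((seg.length - 1) / 2 + 1 + j) (by omega)
              rw [pvGetD_drop]
              rw [← hidx']
              congr 1
              omega)
        · simp only [if_neg hc]
          have hlen' : (seg.take ((seg.length - 1) / 2 + 1)).length
              = (seg.length - 1) / 2 + 1 := by simp; omega
          have hr : l + (((seg.length - 1) / 2 : Nat) : Int)
              = l + ((seg.take ((seg.length - 1) / 2 + 1)).length : Int) - 1 := by
            rw [hlen']; push_cast; ring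
          rw [hr]
          exact ih l _
            (by rw [hlen']; omega)
            (by intro he; rw [← List.length_eq_zero_iff] at he; omega)
            hl
            (by
              intro j hj
              rw [hlen'] at hj
              rw [pvGetD_take seg _ j hj]
              exact hidx j (by omega))
      · rw [pvLoopA, dif_neg (by omega)]
        rw [dif_neg h2]
        have h0 := hidx 0 (by omega)
        simp only [Nat.cast_zero, add_zero] at h0
        have hL := hidx (seg.length - 1) (by omega)
        have hcast : ((seg.length - 1 : Nat) : Int) = (seg.length : Int) - 1 := by omega
        rw [hcast] at hL
        simp only [show l + ((seg.length : Int) - 1) = l + (seg.length : Int) - 1 from by ring] at hL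
        rw [pvGetLastD seg hne]
        simp [h0, hL]

-- ===== VERDICT (by name: the statement is the Claim_ definition above) =====
theorem smallestElementLargerThanTarget_spec : Claim_equal_smallestElementLargerThanTarget := by
  intro array target _ hne
  unfold Spec_smallestElementLargerThanTarget smallestElementLargerThanTarget smallestElementLargerThanTarget_alt
  have h := pvLoopA_eq_segB array target array.length 0 array le_rfl hne le_rfl
    (by intro j hj; simp [pvGet, List.getD, hj])
  simpa using h
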